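-- pv_equiv track=rewrite | github.com/dexforint/PContext | core/envs.py | _normalize_packages
-- ===== SOURCE A (Python) =====
-- from typing import Callable, Iterable, List, Optional, Sequence, Tuple
--
-- def _normalize_packages(packages: Sequence[str]) -> List[str]:
--     """
--     Приводим список пакетов к каноническому виду для хэширования:
--     - убираем пустые,
--     - нормализуем пробелы,
--     - сортируем регистронезависимо,
--     - дедуплицируем, сохраняя порядок после сортировки.
--     """
--     seen = set()
--     items = []
--     for p in packages:
--         s = str(p).strip()
--         if not s:
--             continue
--         key = s.lower()
--         if key in seen:
--             continue
--         seen.add(key)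
--         items.append(s)
--     items.sort(key=lambda x: x.lower())
--     return items
-- ===== SOURCE B (Python) =====
-- def _normalize_packages(packages):
--     cleaned = []
--     for p in packages:
--         s = str(p).strip()
--         if s:
--             cleaned.append(s)
--     cleaned.sort(key=str.lower)
--     out = []
--     last = None
--     for s in cleaned:
--         k = s.lower()
--         if k != last:
--             out.append(s)
--             last = k
--     return out
-- ===== Notes on version B (the rewrite author's own statement) =====
-- stated objective: alternative
-- what changed: B sorts the cleaned list first and then removes duplicates in one adjacent-key pass relying on sort stability, instead of A's seen-set dedup before sorting.
import Mathlib
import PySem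

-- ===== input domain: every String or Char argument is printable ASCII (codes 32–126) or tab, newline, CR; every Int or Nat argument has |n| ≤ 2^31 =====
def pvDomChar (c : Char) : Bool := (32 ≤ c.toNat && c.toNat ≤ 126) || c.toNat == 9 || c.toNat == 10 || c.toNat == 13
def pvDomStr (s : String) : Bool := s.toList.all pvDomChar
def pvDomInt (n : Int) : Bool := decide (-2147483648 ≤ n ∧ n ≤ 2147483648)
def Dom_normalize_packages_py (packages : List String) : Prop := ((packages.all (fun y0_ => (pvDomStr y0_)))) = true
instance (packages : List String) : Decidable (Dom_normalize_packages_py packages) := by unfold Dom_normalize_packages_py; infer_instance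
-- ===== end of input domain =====

-- B replaces A's seen-set dedup-then-sort by clean, stable sort, then one adjacent-key dedup pass; alternative decomposition, same result.

-- ===== PORT A =====
-- A: one pass with a seen-set of lowered keys collecting first occurrences, then sort by lower.
def normalize_packages_py (packages : List String) : List String :=
  let st := packages.foldl
    (fun (acc : PySem.Set String × List String) p =>
      let s := PySem.Str.strip p
      if s = "" then acc
      else
        let key := PySem.Str.lower s
        if PySem.Set.contains acc.1 key then acc
        else (PySem.Set.add acc.1 key, acc.2 ++ [s]))
    (PySem.Set.empty, [])
  PySem.List.sorted st.2 (fun x => PySem.Str.lower x) false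

-- ===== PORT B =====
-- B: clean, stable-sort by lower, then one pass dropping elements whose lowered key equals the last kept key.
def normalize_packages_py_alt (packages : List String) : List String :=
  let cleaned := packages.foldl
    (fun (acc : List String) p =>
      let s := PySem.Str.strip p
      if s = "" then acc else acc ++ [s]) []
  let sortedL := PySem.List.sorted cleaned (fun x => PySem.Str.lower x) false
  (sortedL.foldl
    (fun (st : List String × Option String) s =>
      let k := PySem.Str.lower s
      if st.2 = some k then st else (st.1 ++ [s], some k))
    ([], none)).1

-- ===== PRECONDITION & SPEC =====
def Spec_normalize_packages_py (packages : List String) (out : List String) : Prop := out = normalize_packages_py_alt packages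
instance (packages : List String) (out : List String) : Decidable (Spec_normalize_packages_py packages out) := by unfold Spec_normalize_packages_py; infer_instance

-- ===== CLAIM (what is proved, stated in full; the proofs are below) =====
def Claim_equal_normalize_packages_py : Prop := ∀ (packages : List String), Dom_normalize_packages_py packages → Spec_normalize_packages_py packages (normalize_packages_py packages)

-- ===== LEMMAS AND PROOFS =====

-- the lowered key used everywhere below
def pvLow (s : String) : String := PySem.Str.lower s

-- the cleaned list: stripped inputs, empties removed
def pvClean (ps : List String) : List String :=
  ps.filterMap (fun p => let s := PySem.Str.strip p; if s = "" then none else some s)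

-- A's dedup loop, recursively, with a list of already-seen keys
def pvDF (seen : List String) : List String → List String
  | [] => []
  | x :: xs => if pvLow x ∈ seen then pvDF seen xs else x :: pvDF (seen ++ [pvLow x]) xs

-- B's adjacent-key dedup loop, recursively, with the last kept key as state
def pvDA (last : Option String) : List String → List String
  | [] => []
  | x :: xs => if last = some (pvLow x) then pvDA last xs else x :: pvDA (some (pvLow x)) xs

-- the first element of xs whose lowered key is c
def pvFW (c : String) (xs : List String) : Option String :=
  (xs.filter (fun b => decide (pvLow b = c))).head?

lemma pvFW_mem {c a : String} {xs : List String} (h : pvFW c xs = some a) :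
    a ∈ xs ∧ pvLow a = c := by
  unfold pvFW at h
  rcases hf : xs.filter (fun b => decide (pvLow b = c)) with _ | ⟨b, bs⟩
  · rw [hf] at h; simp at h
  · rw [hf] at h
    simp only [List.head?_cons, Option.some.injEq] at h
    have hb : b ∈ xs.filter (fun b => decide (pvLow b = c)) := by
      rw [hf]; exact List.mem_cons_self
    rcases List.mem_filter.mp hb with ⟨hmem, hp⟩
    exact h ▸ ⟨hmem, of_decide_eq_true hp⟩

lemma pvClean_foldl (ps : List String) (acc : List String) :
    ps.foldl (fun (acc : List String) p =>
      let s := PySem.Str.strip p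
      if s = "" then acc else acc ++ [s]) acc = acc ++ pvClean ps := by
  induction ps generalizing acc with
  | nil => simp [pvClean]
  | cons p ps ih =>
    simp only [List.foldl_cons, pvClean, List.filterMap_cons]
    by_cases h : PySem.Str.strip p = "" <;> simp [h, ih, pvClean]

lemma pvClean_cons_pos {p : String} (ps : List String) (h : PySem.Str.strip p = "") :
    pvClean (p :: ps) = pvClean ps := by
  simp [pvClean, h]

lemma pvClean_cons_neg {p : String} (ps : List String) (h : ¬ PySem.Str.strip p = "") :
    pvClean (p :: ps) = PySem.Str.strip p :: pvClean ps := by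
  simp [pvClean, h]

lemma pvA_foldl (ps : List String) (seen items : List String) :
    (ps.foldl
      (fun (acc : PySem.Set String × List String) p =>
        let s := PySem.Str.strip p
        if s = "" then acc
        else
          let key := PySem.Str.lower s
          if PySem.Set.contains acc.1 key then acc
          else (PySem.Set.add acc.1 key, acc.2 ++ [s]))
      (seen, items)).2 = items ++ pvDF seen (pvClean ps) := by
  induction ps generalizing seen items with
  | nil => simp [pvClean, pvDF]
  | cons p ps ih =>
    simp only [List.foldl_cons]
    by_cases h : PySem.Str.strip p = ""
    · rw [if_pos h, ih seen items, pvClean_cons_pos ps h]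
    · rw [if_neg h]
      by_cases hm : PySem.Str.lower (PySem.Str.strip p) ∈ seen
      · have hc : PySem.Set.contains seen (PySem.Str.lower (PySem.Str.strip p)) = true := by
          simp [PySem.Set.contains]; exact hm
        rw [if_pos hc, ih seen items, pvClean_cons_neg ps h]
        simp only [pvDF, pvLow]
        rw [if_pos hm]
      · have hc : PySem.Set.contains seen (PySem.Str.lower (PySem.Str.strip p)) = false := by
          simp [PySem.Set.contains]; exact hm
        have hadd : PySem.Set.add seen (PySem.Str.lower (PySem.Str.strip p))
            = seen ++ [PySem.Str.lower (PySem.Str.strip p)] := by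
          simp [PySem.Set.add, PySem.Set.contains]; exact hm
        rw [if_neg (by simp [PySem.Set.contains]; exact hm), hadd, ih, pvClean_cons_neg ps h]
        simp only [pvDF, pvLow]
        rw [if_neg hm, List.append_assoc]
        rfl

lemma pvB_foldl (s : List String) (out : List String) (last : Option String) :
    (s.foldl
      (fun (st : List String × Option String) s =>
        let k := PySem.Str.lower s
        if st.2 = some k then st else (st.1 ++ [s], some k))
      (out, last)).1 = out ++ pvDA last s := by
  induction s generalizing out last with
  | nil => simp [pvDA]
  | cons x xs ih =>
    simp only [List.foldl_cons]
    by_cases h : last = some (PySem.Str.lower x)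
    · simp [h, pvDA, ih, pvLow]
    · simp [h, pvDA, ih, pvLow]

-- equation lemmas for PySem.List.insertBy
lemma pvInsertBy_nil (bef : String → String → Bool) (x : String) :
    PySem.List.insertBy bef x [] = [x] := rfl

lemma pvInsertBy_cons (bef : String → String → Bool) (x y : String) (ys : List String) :
    PySem.List.insertBy bef x (y :: ys)
      = if bef x y then x :: y :: ys else y :: PySem.List.insertBy bef x ys := rfl

-- stability of PySem.List.sorted: filtering one key class commutes with inserting
lemma pvFilter_insertBy (x : String) (c : String) (s : List String)
    (hs : s.Pairwise (fun a b => pvLow a ≤ pvLow b)) :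
    (PySem.List.insertBy (fun a b => decide (pvLow a < pvLow b)) x s).filter
        (fun b => decide (pvLow b = c)) =
      if pvLow x = c then s.filter (fun b => decide (pvLow b = c)) ++ [x]
      else s.filter (fun b => decide (pvLow b = c)) := by
  induction s with
  | nil =>
    rw [pvInsertBy_nil]
    by_cases h : pvLow x = c <;> simp [h]
  | cons y ys ih =>
    rcases List.pairwise_cons.mp hs with ⟨hy, hys⟩
    rw [pvInsertBy_cons]
    by_cases hb : pvLow x < pvLow y
    · rw [if_pos (decide_eq_true hb)]
      by_cases hxc : pvLow x = c
      · have hfilt : (y :: ys).filter (fun b => decide (pvLow b = c)) = [] := by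
          apply List.filter_eq_nil_iff.mpr
          intro b hbmem
          simp only [decide_eq_true_eq]
          intro hbc
          have hxb : pvLow x < pvLow b := by
            rcases List.mem_cons.mp hbmem with hbe | hbe
            · subst hbe; exact hb
            · exact lt_of_lt_of_le hb (hy b hbe)
          exact absurd hxb (by rw [hxc, hbc]; exact lt_irrefl c)
        rw [if_pos hxc, List.filter_cons,
          if_pos (show decide (pvLow x = c) = true from decide_eq_true hxc), hfilt]
        rfl
      · rw [if_neg hxc, List.filter_cons,
          if_neg (by simp [hxc] : ¬ decide (pvLow x = c) = true)]
    · rw [if_neg (by simp [hb] : ¬ (decide (pvLow x < pvLow y) = true)),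
        List.filter_cons, ih hys]
      by_cases hxc : pvLow x = c <;> by_cases hyc : pvLow y = c <;>
        simp [hxc, hyc]

lemma pvStable (xs : List String) (c : String) :
    (PySem.List.sorted xs (fun x => pvLow x) false).filter (fun b => decide (pvLow b = c)) =
      xs.filter (fun b => decide (pvLow b = c)) := by
  induction xs using List.reverseRecOn with
  | nil => simp [PySem.List.sorted]
  | append_singleton xs x ih =>
    have hsort : PySem.List.sorted (xs ++ [x]) (fun x => pvLow x) false
        = PySem.List.insertBy (fun a b => decide (pvLow a < pvLow b)) x
            (PySem.List.sorted xs (fun x => pvLow x) false) := by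
      rw [PySem.List.sorted_eq_foldl_insertBy, PySem.List.sorted_eq_foldl_insertBy,
        List.foldl_append]
      simp
    rw [hsort, pvFilter_insertBy x c _ (PySem.List.sorted_pairwise xs (fun x => pvLow x)),
      List.filter_append]
    by_cases hxc : pvLow x = c <;> simp [hxc, ih]

lemma pvMem_dF (xs : List String) (seen : List String) (a : String) :
    a ∈ pvDF seen xs ↔ pvLow a ∉ seen ∧ pvFW (pvLow a) xs = some a := by
  induction xs generalizing seen with
  | nil => simp [pvDF, pvFW]
  | cons x xs ih =>
    by_cases hm : pvLow x ∈ seen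
    · rw [pvDF, if_pos hm]
      by_cases hk : pvLow x = pvLow a
      · constructor
        · intro h
          exact absurd hm (hk ▸ ((ih seen).mp h).1)
        · rintro ⟨hns, -⟩; exact absurd (hk ▸ hm) hns
      · have hfw : pvFW (pvLow a) (x :: xs) = pvFW (pvLow a) xs := by
          simp [pvFW, hk]
        rw [ih seen, hfw]
    · rw [pvDF, if_neg hm]
      by_cases hax : a = x
      · subst hax
        simp only [List.mem_cons, true_or, true_iff]
        exact ⟨hm, by simp [pvFW]⟩
      · simp only [List.mem_cons, hax, false_or]
        rw [ih]
        by_cases hk : pvLow x = pvLow a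
        · have hfw : pvFW (pvLow a) (x :: xs) = some x := by
            simp [pvFW, hk]
          constructor
          · rintro ⟨hns, -⟩
            exact absurd (List.mem_append.mpr (Or.inr (by simp [hk]))) hns
          · rintro ⟨-, hfa⟩
            rw [hfw] at hfa
            injection hfa with hfa
            exact absurd hfa.symm hax
        · have hfw : pvFW (pvLow a) (x :: xs) = pvFW (pvLow a) xs := by
            simp [pvFW, hk]
          rw [hfw]
          constructor
          · rintro ⟨hns, hfa⟩
            exact ⟨fun hmem => hns (List.mem_append.mpr (Or.inl hmem)), hfa⟩
          · rintro ⟨hns, hfa⟩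
            refine ⟨fun hmem => ?_, hfa⟩
            rcases List.mem_append.mp hmem with h | h
            · exact hns h
            · simp at h; exact hk h.symm

lemma pvDF_keys (xs : List String) (seen : List String) :
    ((pvDF seen xs).map pvLow).Nodup ∧ ∀ a ∈ pvDF seen xs, pvLow a ∉ seen := by
  induction xs generalizing seen with
  | nil => simp [pvDF]
  | cons x xs ih =>
    by_cases hm : pvLow x ∈ seen
    · rw [pvDF, if_pos hm]; exact ih seen
    · rw [pvDF, if_neg hm]
      rcases ih (seen ++ [pvLow x]) with ⟨hnd, hnotin⟩
      refine ⟨?_, ?_⟩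
      · simp only [List.map_cons, List.nodup_cons]
        refine ⟨?_, hnd⟩
        intro hmem
        rcases List.mem_map.mp hmem with ⟨b, hb, hkb⟩
        exact hnotin b hb (List.mem_append.mpr (Or.inr (by simp [hkb])))
      · intro a ha
        rcases List.mem_cons.mp ha with h | h
        · subst h; exact hm
        · intro hseen
          exact hnotin a h (List.mem_append.mpr (Or.inl hseen))

-- invariant for pvDA's state: the last kept key bounds every remaining key
def pvInv (last : Option String) (s : List String) : Prop :=
  ∀ b ∈ s, ∀ k, last = some k → k ≤ pvLow b

lemma pvDA_facts (s : List String) (last : Option String)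
    (hs : s.Pairwise (fun a b => pvLow a ≤ pvLow b)) (hinv : pvInv last s) :
    (pvDA last s).Pairwise (fun a b => pvLow a < pvLow b) ∧
      ∀ a ∈ pvDA last s, ∀ k, last = some k → k < pvLow a := by
  induction s generalizing last with
  | nil => simp [pvDA]
  | cons x xs ih =>
    rcases List.pairwise_cons.mp hs with ⟨hx, hxs⟩
    by_cases h : last = some (pvLow x)
    · rw [pvDA, if_pos h]
      exact ih last hxs (fun b hb k hk => hinv b (List.mem_cons_of_mem x hb) k hk)
    · rw [pvDA, if_neg h]
      have hinv' : pvInv (some (pvLow x)) xs := by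
        intro b hb k hk
        injection hk with hk; subst hk; exact hx b hb
      rcases ih (some (pvLow x)) hxs hinv' with ⟨hpw, hmem⟩
      refine ⟨List.pairwise_cons.mpr ⟨fun a ha => hmem a ha (pvLow x) rfl, hpw⟩, ?_⟩
      intro a ha k hk
      rcases List.mem_cons.mp ha with h' | h'
      · subst h'
        have hle : k ≤ pvLow a := hinv a List.mem_cons_self k hk
        exact lt_of_le_of_ne hle (fun he => h (by rw [hk, he]))
      · have hlt : pvLow x < pvLow a := hmem a h' (pvLow x) rfl
        exact lt_of_le_of_lt (hinv x List.mem_cons_self k hk) hlt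

lemma pvMem_dA (s : List String) (last : Option String) (a : String)
    (hs : s.Pairwise (fun a b => pvLow a ≤ pvLow b)) (hinv : pvInv last s) :
    a ∈ pvDA last s ↔ last ≠ some (pvLow a) ∧ pvFW (pvLow a) s = some a := by
  induction s generalizing last with
  | nil => simp [pvDA, pvFW]
  | cons x xs ih =>
    rcases List.pairwise_cons.mp hs with ⟨hx, hxs⟩
    by_cases h : last = some (pvLow x)
    · rw [pvDA, if_pos h]
      have hinvt : pvInv last xs := fun b hb k hk => hinv b (List.mem_cons_of_mem x hb) k hk
      by_cases hk : pvLow x = pvLow a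
      · rw [ih last hxs hinvt]
        have hlast : last = some (pvLow a) := hk ▸ h
        constructor
        · rintro ⟨hne, -⟩; exact absurd hlast hne
        · rintro ⟨hne, -⟩; exact absurd hlast hne
      · have hfw : pvFW (pvLow a) (x :: xs) = pvFW (pvLow a) xs := by
          simp [pvFW, hk]
        rw [ih last hxs hinvt, hfw]
    · rw [pvDA, if_neg h]
      have hinv' : pvInv (some (pvLow x)) xs := by
        intro b hb k hk
        injection hk with hk; subst hk; exact hx b hb
      by_cases hax : a = x
      · subst hax
        simp only [List.mem_cons, true_or, true_iff]
        exact ⟨fun he => h he, by simp [pvFW]⟩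
      · simp only [List.mem_cons, hax, false_or]
        rw [ih (some (pvLow x)) hxs hinv']
        by_cases hk : pvLow x = pvLow a
        · have hfw : pvFW (pvLow a) (x :: xs) = some x := by
            simp [pvFW, hk]
          constructor
          · rintro ⟨hne, -⟩; exact absurd (congrArg some hk) hne
          · rintro ⟨-, hfa⟩
            rw [hfw] at hfa
            injection hfa with hfa
            exact absurd hfa.symm hax
        · have hfw : pvFW (pvLow a) (x :: xs) = pvFW (pvLow a) xs := by
            simp [pvFW, hk]
          rw [hfw]
          constructor
          · rintro ⟨hne, hfa⟩
            refine ⟨?_, hfa⟩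
            rintro rfl
            rcases pvFW_mem hfa with ⟨hamem, -⟩
            have hle : pvLow x ≤ pvLow a := hx a hamem
            have hlt : pvLow a < pvLow x :=
              lt_of_le_of_ne (hinv x List.mem_cons_self (pvLow a) rfl)
                (fun he => h (by rw [he]))
            exact absurd hle (not_le_of_gt hlt)
          · rintro ⟨hne, hfa⟩
            exact ⟨fun he => hk (Option.some.inj he), hfa⟩

-- the crux: adjacent dedup of the stable sort equals the sort of the first-occurrence dedup
lemma pvMain (cleaned : List String) :
    pvDA none (PySem.List.sorted cleaned (fun x => pvLow x) false) =
      PySem.List.sorted (pvDF [] cleaned) (fun x => pvLow x) false := by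
  have hsp := PySem.List.sorted_pairwise cleaned (fun x => pvLow x)
  have hinv : pvInv none (PySem.List.sorted cleaned (fun x => pvLow x) false) := by
    intro b hb k hk; cases hk
  rcases pvDA_facts _ none hsp hinv with ⟨hpw, -⟩
  have hndA : (pvDA none (PySem.List.sorted cleaned (fun x => pvLow x) false)).Nodup :=
    List.Pairwise.imp (fun hlt he => absurd (he ▸ hlt) (lt_irrefl _)) hpw
  have hndF : (pvDF ([] : List String) cleaned).Nodup :=
    (pvDF_keys cleaned []).1.of_map
  have hperm : (pvDA none (PySem.List.sorted cleaned (fun x => pvLow x) false)).Perm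
      (pvDF [] cleaned) := by
    rw [List.perm_ext_iff_of_nodup hndA hndF]
    intro a
    rw [pvMem_dA _ none a hsp hinv, pvMem_dF]
    have hfw : pvFW (pvLow a) (PySem.List.sorted cleaned (fun x => pvLow x) false)
        = pvFW (pvLow a) cleaned := by
      unfold pvFW
      rw [pvStable]
    rw [hfw]
    simp
  exact (PySem.List.sorted_eq_of_perm_of_pairwise_lt _ _ _ hperm hpw).symm

-- ===== VERDICT (by name: the statement is the Claim_ definition above) =====
theorem normalize_packages_py_spec : Claim_equal_normalize_packages_py := by
  intro packages _
  show normalize_packages_py packages = normalize_packages_py_alt packages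
  unfold normalize_packages_py normalize_packages_py_alt
  simp only []
  rw [pvB_foldl, pvClean_foldl]
  rw [pvA_foldl packages PySem.Set.empty []]
  simp only [List.nil_append]
  have : (fun x => PySem.Str.lower x) = (fun x => pvLow x) := rfl
  rw [this, pvMain]
  rfl
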